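-- pv_equiv track=rewrite | github.com/Leehwa531/Baekjoon-Algorithms | 4659_비밀번호-발음하기.py | is_acceptable
-- ===== SOURCE A (Python) =====
-- def is_acceptable(password):
--   vowels = {'a','e','i','o','u'}
--
--   # 조건 1 : 모음 하나 이상 포함
--   has_vowel = any(char in vowels for char in password)
--   if not has_vowel:
--     return False
--
--   # 조건 2 : 모음 또는 자음이 3번 연속으로 오면 안 된다.
--   vowel_count, consonant_count = 0,0
--   for char in password:
--     if char in vowels:
--       vowel_count += 1
--       consonant_count = 0
--     else:
--       consonant_count += 1
--       vowel_count = 0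
--     if vowel_count == 3 or consonant_count == 3:
--       return False
--
--   # 조건 3 : 같은 글자가 연속 2번 x, 단 e,o는 허용
--   for i in range(1, len(password)):
--     if password[i] == password[i - 1] and password[i] not in ('e', 'o'):
--       return False
--
--   return True
-- ===== SOURCE B (Python) =====
-- def is_acceptable(password):
--   vowels = {'a', 'e', 'i', 'o', 'u'}
--   has_vowel = False
--   vowel_run = consonant_run = 0
--   prev = None
--   for char in password:
--     if char in vowels:
--       has_vowel = True
--       vowel_run += 1
--       consonant_run = 0
--     else:
--       consonant_run += 1
--       vowel_run = 0
--     if vowel_run == 3 or consonant_run == 3: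
--       return False
--     if prev == char and char not in ('e', 'o'):
--       return False
--     prev = char
--   return has_vowel
-- ===== Notes on version B (the rewrite author's own statement) =====
-- stated objective: simpler
-- what changed: Replaces A's three separate passes (a vowel scan, a run-counting loop, and an index-based adjacent-duplicate loop) with a single fused pass that tracks a has-vowel flag, both run counters and the previous character.
import Mathlib
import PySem

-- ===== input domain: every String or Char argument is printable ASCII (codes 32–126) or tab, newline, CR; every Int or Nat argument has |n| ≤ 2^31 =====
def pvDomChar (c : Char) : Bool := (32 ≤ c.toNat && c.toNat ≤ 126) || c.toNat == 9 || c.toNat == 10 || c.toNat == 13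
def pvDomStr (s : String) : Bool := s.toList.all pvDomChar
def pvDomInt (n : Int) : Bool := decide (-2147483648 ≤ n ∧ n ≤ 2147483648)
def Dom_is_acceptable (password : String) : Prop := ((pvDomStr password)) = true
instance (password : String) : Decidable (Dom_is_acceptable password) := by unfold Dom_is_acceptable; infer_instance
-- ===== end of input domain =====

-- B fuses A's three passes (vowel scan, run-counting loop, index-based adjacent-duplicate loop)
-- into one loop carrying a has-vowel flag, both run counters and the previous character (simpler; same O(n) cost).

-- ===== PORT A =====
-- vowels = {'a','e','i','o','u'}
def pvVowels : PySem.Set Char := PySem.Set.ofList ['a', 'e', 'i', 'o', 'u']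

-- condition 2 loop: for char in password with vowel_count/consonant_count, early return False
def pvA_loop2 : Nat → Nat → List Char → Bool
  | _, _, [] => true
  | vc, cc, c :: rest =>
    let p := if PySem.Set.contains pvVowels c then (vc + 1, 0) else (0, cc + 1)
    if p.1 = 3 ∨ p.2 = 3 then false else pvA_loop2 p.1 p.2 rest

-- condition 3 loop: for i in range(1, len(password)) with password[i], password[i-1]
def pvA_loop3 (l : List Char) : List Int → Bool
  | [] => true
  | i :: is =>
    match PySem.List.pyGet? l i, PySem.List.pyGet? l (i - 1) with
    | some a, some b =>
      if a == b && !(a == 'e' || a == 'o') then false else pvA_loop3 l is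
    | _, _ => false  -- IndexError: unreachable, i ranges over valid indices

def is_acceptable (password : String) : Bool :=
  -- 조건 1
  if !(password.toList.any (fun c => PySem.Set.contains pvVowels c)) then false
  -- 조건 2
  else if pvA_loop2 0 0 password.toList = false then false
  -- 조건 3
  else pvA_loop3 password.toList (PySem.List.pyRange 1 password.toList.length 1)

-- ===== PORT B =====
def pvB_loop : Option Char → Nat → Nat → Bool → List Char → Bool
  | _, _, _, hv, [] => hv
  | prev, vc, cc, hv, c :: rest =>
    let v := PySem.Set.contains pvVowels c
    let hv' := hv || v
    let p := if v then (vc + 1, 0) else (0, cc + 1)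
    if p.1 = 3 ∨ p.2 = 3 then false
    else if prev == some c && !(c == 'e' || c == 'o') then false
    else pvB_loop (some c) p.1 p.2 hv' rest

def is_acceptable_alt (password : String) : Bool :=
  pvB_loop none 0 0 false password.toList

-- ===== PRECONDITION & SPEC =====
def Spec_is_acceptable (password : String) (out : Bool) : Prop := out = is_acceptable_alt password
instance (password : String) (out : Bool) : Decidable (Spec_is_acceptable password out) := by unfold Spec_is_acceptable; infer_instance

-- ===== CLAIM (what is proved, stated in full; the proofs are below) =====
def Claim_equal_is_acceptable : Prop := ∀ (password : String), Dom_is_acceptable password → Spec_is_acceptable password (is_acceptable password)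

-- ===== LEMMAS AND PROOFS =====

-- adjacent-duplicate check, carrying the previous character (proof-side characterisation)
def pvAdj : Option Char → List Char → Bool
  | _, [] => true
  | prev, c :: rest =>
    if prev == some c && !(c == 'e' || c == 'o') then false else pvAdj (some c) rest

-- B's loop is the conjunction of A's three checks
theorem pvB_loop_eq (l : List Char) : ∀ (prev : Option Char) (vc cc : Nat) (hv : Bool),
    pvB_loop prev vc cc hv l =
      ((pvA_loop2 vc cc l && pvAdj prev l) && (hv || l.any (fun c => PySem.Set.contains pvVowels c))) := by
  induction l with
  | nil => intro prev vc cc hv; simp [pvB_loop, pvA_loop2, pvAdj]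
  | cons c rest ih =>
    intro prev vc cc hv
    simp only [pvB_loop, pvA_loop2, pvAdj, List.any_cons]
    by_cases h2 : ((if PySem.Set.contains pvVowels c then (vc + 1, 0) else (0, cc + 1)).1 = 3 ∨
        (if PySem.Set.contains pvVowels c then (vc + 1, 0) else (0, cc + 1)).2 = 3)
    · rw [if_pos h2, if_pos h2]; simp
    · rw [if_neg h2, if_neg h2]
      by_cases h3 : (prev == some c && !(c == 'e' || c == 'o')) = true
      · rw [if_pos h3, if_pos h3]; simp
      · rw [if_neg h3, if_neg h3, ih, Bool.or_assoc]

-- A's index loop over range(1, len) from position i equals pvAdj on the i-th suffix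
theorem pvA_loop3_eq (l : List Char) : ∀ (n i : Nat), l.length - i ≤ n →
    pvA_loop3 l (PySem.List.pyRange ((i : Int) + 1) l.length 1) = pvAdj none (l.drop i) := by
  intro n
  induction n with
  | zero =>
    intro i h
    rw [PySem.List.pyRange_one_eq_nil (by omega)]
    have hd : l.drop i = [] := by
      have := List.length_drop (l := l) (i := i)
      exact List.eq_nil_of_length_eq_zero (by omega)
    simp [pvA_loop3, hd, pvAdj]
  | succ n ihn =>
    intro i h
    by_cases hi1 : i + 1 < l.length
    · rw [PySem.List.pyRange_one_cons (by omega)]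
      have hcast : ((i : Int) + 1) = ((i + 1 : Nat) : Int) := by push_cast; ring
      have hg1 : PySem.List.pyGet? l ((i : Int) + 1) = some l[i + 1] := by
        rw [hcast, PySem.List.pyGet?_natCast]; simp [hi1]
      have hg2 : PySem.List.pyGet? l ((i : Int) + 1 - 1) = some l[i] := by
        have : ((i : Int) + 1 - 1) = ((i : Nat) : Int) := by ring
        rw [this, PySem.List.pyGet?_natCast]; simp [Nat.lt_of_succ_lt hi1]
      have hdrop : l.drop i = l[i] :: l[i + 1] :: l.drop (i + 2) := by
        rw [List.drop_eq_getElem_cons (by omega), List.drop_eq_getElem_cons (by omega)]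
      have hdrop1 : l.drop (i + 1) = l[i + 1] :: l.drop (i + 2) := by
        rw [List.drop_eq_getElem_cons (by omega)]
      have harr : ((i : Int) + 1 + 1) = (((i + 1 : Nat) : Int) + 1) := by push_cast; ring
      have hnone : ∀ (x : Char) (r : List Char), pvAdj none (x :: r) = pvAdj (some x) r := by
        intro x r; simp [pvAdj]
      have hcond : (l[i + 1] == l[i] && !(l[i + 1] == 'e' || l[i + 1] == 'o'))
          = (some l[i] == some l[i + 1] && !(l[i + 1] == 'e' || l[i + 1] == 'o')) := by
        rw [BEq.comm (a := l[i + 1]) (b := l[i])]; simp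
      simp only [pvA_loop3, hg1, hg2]
      rw [harr, ihn (i + 1) (by omega), hdrop, hdrop1, hnone, hnone, hcond]
      conv_rhs => rw [pvAdj]
    · rw [PySem.List.pyRange_one_eq_nil (by omega)]
      have hlen : (l.drop i).length ≤ 1 := by
        have := List.length_drop (l := l) (i := i); omega
      match hdd : l.drop i with
      | [] => simp [pvA_loop3, pvAdj]
      | [a] => simp [pvA_loop3, pvAdj]
      | a :: b :: t => rw [hdd] at hlen; simp at hlen

-- ===== VERDICT (by name: the statement is the Claim_ definition above) =====
theorem is_acceptable_spec : Claim_equal_is_acceptable := by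
  intro password _
  unfold Spec_is_acceptable is_acceptable is_acceptable_alt
  rw [pvB_loop_eq]
  have h3 : pvA_loop3 password.toList (PySem.List.pyRange 1 password.toList.length 1) =
      pvAdj none password.toList := by
    simpa using pvA_loop3_eq password.toList password.toList.length 0 (by omega)
  rw [h3]
  cases h1 : password.toList.any (fun c => PySem.Set.contains pvVowels c) <;>
    cases h2 : pvA_loop2 0 0 password.toList <;>
      cases h4 : pvAdj none password.toList <;> simp
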